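-- pv_equiv track=rewrite | github.com/ivan-kud/ml-projects | text-classification/myutils_cb.py | burn_tokens
-- ===== SOURCE A (Python) =====
-- def burn_tokens(tokens: list):
--     """Burn token after each number"""
--
--     t = []
--     burn_next = False
--     for token in tokens:
--         if token.isdigit():
--             burn_next = True
--             t.append(token)
--         elif burn_next:
--             burn_next = False
--         else:
--             t.append(token)
--     return t
-- ===== SOURCE B (Python) =====
-- def burn_tokens(tokens: list):
--     """Burn token after each number"""
--     out = []
--     i = 0
--     n = len(tokens)
--     while i < n:
--         tok = tokens[i]
--         out.append(tok)
--         if tok.isdigit() and i + 1 < n and not tokens[i + 1].isdigit():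
--             i += 2
--         else:
--             i += 1
--     return out
-- ===== Notes on version B (the rewrite author's own statement) =====
-- stated objective: alternative
-- what changed: Replaces A's flag-carrying element-by-element state machine with a cursor loop that, on seeing a digit followed by a non-digit, emits the digit and jumps the cursor two positions ahead, so no boolean state is ever maintained.
import Mathlib
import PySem

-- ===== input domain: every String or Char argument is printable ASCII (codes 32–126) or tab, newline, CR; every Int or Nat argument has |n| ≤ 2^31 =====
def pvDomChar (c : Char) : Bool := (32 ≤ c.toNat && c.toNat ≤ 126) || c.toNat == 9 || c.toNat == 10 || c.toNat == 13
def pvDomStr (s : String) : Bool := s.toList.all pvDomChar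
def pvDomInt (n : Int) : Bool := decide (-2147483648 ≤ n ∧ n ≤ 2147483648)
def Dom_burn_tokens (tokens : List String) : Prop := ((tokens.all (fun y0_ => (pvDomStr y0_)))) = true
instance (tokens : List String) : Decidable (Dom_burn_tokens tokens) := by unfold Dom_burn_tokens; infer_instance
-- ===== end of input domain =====

-- B replaces A's flag-carrying state machine by a cursor loop that jumps two positions
-- past a digit-followed-by-non-digit pair, keeping no boolean state (objective: alternative).

-- ===== PORT A =====
-- literal port of A: a fold carrying (t, burn_next)
def burn_tokens (tokens : List String) : List String :=
  (tokens.foldl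
    (fun (st : List String × Bool) token =>
      if PySem.Str.strIsdigit token then (st.1 ++ [token], true)
      else if st.2 then (st.1, false)
      else (st.1 ++ [token], st.2))
    ([], false)).1

-- ===== PORT B =====
-- literal port of Source B's while loop; the cursor i is a Nat since Python's i starts at 0 and
-- only ever grows. tokens[i] is tokens[i] under the guard i < n; tokens[i+1] is read as
-- tokens.getD (i+1) "" — the guard `i + 1 < n` precedes it in the && chain, so the default
-- is never the decisive value and the port is exact.
def pvBurnLoop (tokens : List String) (out : List String) (i : Nat) : List String :=
  if h : i < tokens.length then
    let tok := tokens[i]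
    let out' := out ++ [tok]
    if PySem.Str.strIsdigit tok && decide (i + 1 < tokens.length) &&
        !(PySem.Str.strIsdigit (tokens.getD (i + 1) "")) then
      pvBurnLoop tokens out' (i + 2)
    else
      pvBurnLoop tokens out' (i + 1)
  else out
termination_by tokens.length - i

def burn_tokens_alt (tokens : List String) : List String :=
  pvBurnLoop tokens [] 0

-- ===== PRECONDITION & SPEC =====
def Spec_burn_tokens (tokens : List String) (out : List String) : Prop := out = burn_tokens_alt tokens
instance (tokens : List String) (out : List String) : Decidable (Spec_burn_tokens tokens out) := by unfold Spec_burn_tokens; infer_instance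

-- ===== CLAIM (what is proved, stated in full; the proofs are below) =====
def Claim_equal_burn_tokens : Prop := ∀ (tokens : List String), Dom_burn_tokens tokens → Spec_burn_tokens tokens (burn_tokens tokens)

-- ===== LEMMAS AND PROOFS =====

-- A's state machine with flag `b`, as a recursion
def pvArmed (b : Bool) : List String → List String
  | [] => []
  | x :: xs =>
    if PySem.Str.strIsdigit x then x :: pvArmed true xs
    else if b then pvArmed false xs
    else x :: pvArmed false xs

-- B's pair-skipping recursion, index-free
def pvSkip : List String → List String
  | [] => []
  | [x] => [x]
  | x :: y :: rest =>
    if PySem.Str.strIsdigit x && !(PySem.Str.strIsdigit y) then x :: pvSkip rest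
    else x :: pvSkip (y :: rest)

-- A's fold equals pvArmed
theorem pvA_foldl (xs : List String) (acc : List String) (b : Bool) :
    (xs.foldl
      (fun (st : List String × Bool) token =>
        if PySem.Str.strIsdigit token then (st.1 ++ [token], true)
        else if st.2 then (st.1, false)
        else (st.1 ++ [token], st.2))
      (acc, b)).1 = acc ++ pvArmed b xs := by
  induction xs generalizing acc b with
  | nil => simp [pvArmed]
  | cons x xs ih =>
    simp only [PySem.Str.strIsdigit_eq] at ih
    cases h : PySem.Chars.strIsdigit x.toList <;> cases b <;>
      simp [pvArmed, h, ih]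

theorem pvArmed_eq_pvSkip (xs : List String) : pvArmed false xs = pvSkip xs := by
  induction xs using pvSkip.induct with
  | case1 => rfl
  | case2 x => cases h : PySem.Chars.strIsdigit x.toList <;> simp [pvArmed, pvSkip, h]
  | case3 x y rest hc ih =>
    simp only [PySem.Str.strIsdigit_eq, Bool.and_eq_true, Bool.not_eq_true'] at hc
    simp [pvArmed, pvSkip, hc.1, hc.2, ih]
  | case4 x y rest hc ih =>
    simp only [PySem.Str.strIsdigit_eq, Bool.and_eq_true, Bool.not_eq_true'] at hc
    cases hx : PySem.Chars.strIsdigit x.toList with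
    | false =>
      rw [pvSkip, if_neg (by simp [hx]), ← ih]
      cases hy : PySem.Chars.strIsdigit y.toList <;> simp [pvArmed, hx, hy]
    | true =>
      have hy : PySem.Chars.strIsdigit y.toList = true := by
        by_contra h
        exact hc ⟨hx, by simpa using h⟩
      simp [pvArmed, pvSkip, hx, hy, ← ih]

set_option maxRecDepth 8000 in
-- the cursor loop, started at i, appends pvSkip of the remaining suffix
theorem pvBurnLoop_eq (tokens : List String) :
    ∀ k i out, tokens.length - i ≤ k →
      pvBurnLoop tokens out i = out ++ pvSkip (tokens.drop i) := by
  intro k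
  induction k with
  | zero =>
    intro i out hk
    have hge : tokens.length ≤ i := by omega
    rw [pvBurnLoop, dif_neg (by omega), List.drop_eq_nil_of_le hge]
    simp [pvSkip]
  | succ k ih =>
    intro i out hk
    by_cases hi : i < tokens.length
    · have hdi : tokens.drop i = tokens[i] :: tokens.drop (i + 1) :=
        List.drop_eq_getElem_cons hi
      rw [pvBurnLoop, dif_pos hi]
      by_cases hi1 : i + 1 < tokens.length
      · have hgd : tokens.getD (i + 1) "" = tokens[i + 1] := List.getD_eq_getElem _ _ hi1
        have hdi1 : tokens.drop (i + 1) = tokens[i + 1] :: tokens.drop (i + 2) :=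
          List.drop_eq_getElem_cons hi1
        rw [hdi, hdi1]
        cases hx : PySem.Chars.strIsdigit tokens[i].toList <;>
          cases hy : PySem.Chars.strIsdigit tokens[i + 1].toList <;>
          · rw [pvSkip]
            simp only [PySem.Str.strIsdigit_eq, hgd, hx, hy, decide_eq_true hi1]
            simp only [Bool.and_false, Bool.and_true, Bool.true_and, Bool.false_and,
              Bool.not_false, Bool.not_true, if_false, if_true,
              ih (i + 2) (out ++ [tokens[i]]) (by omega),
              ih (i + 1) (out ++ [tokens[i]]) (by omega), hdi1]
            simp [hx, hy]
      · have hnil : tokens.drop (i + 1) = [] := List.drop_eq_nil_of_le (by omega)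
        simp [PySem.Str.strIsdigit_eq, hi1, hdi, hnil, pvSkip,
          ih (i + 1) (out ++ [tokens[i]]) (by omega)]
    · have hge : tokens.length ≤ i := by omega
      rw [pvBurnLoop, dif_neg (by omega), List.drop_eq_nil_of_le hge]
      simp [pvSkip]

-- ===== VERDICT (by name: the statement is the Claim_ definition above) =====
theorem burn_tokens_spec : Claim_equal_burn_tokens := by
  intro tokens _
  unfold Spec_burn_tokens burn_tokens burn_tokens_alt
  rw [pvA_foldl, pvBurnLoop_eq tokens tokens.length 0 [] (by omega)]
  simp [pvArmed_eq_pvSkip]
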